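-- pv_equiv track=rewrite | github.com/DanunjayaRao/Ai-leave-management-system | rag_system.py | _extract_reason_from_message
-- ===== SOURCE A (Python) =====
-- def _extract_reason_from_message(message):
--     """Extract reason from the message"""
--     message_lower = message.lower()
--
--     if 'vacation' in message_lower:
--         return "Vacation"
--     elif any(word in message_lower for word in ['sick', 'medical', 'ill', 'hospital', 'doctor', 'fever', 'health', 'not well']):
--         return "Medical"
--     elif any(word in message_lower for word in ['emergency', 'urgent', 'personal']):
--         return "Personal Emergency"
--     elif any(word in message_lower for word in ['family', 'relative', 'parent']):
--         return "Family Matter"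
--     elif any(word in message_lower for word in ['wedding', 'marriage']):
--         return "Wedding"
--     elif any(word in message_lower for word in ['festival', 'celebration', 'holiday', 'diwali', 'christmas']):
--         return "Festival/Celebration"
--     else:
--         return "Personal"
-- ===== SOURCE B (Python) =====
-- KEYWORD_PRIORITY = [
--     ("vacation", 0),
--     ("sick", 1), ("medical", 1), ("ill", 1), ("hospital", 1),
--     ("doctor", 1), ("fever", 1), ("health", 1), ("not well", 1),
--     ("emergency", 2), ("urgent", 2), ("personal", 2),
--     ("family", 3), ("relative", 3), ("parent", 3),
--     ("wedding", 4), ("marriage", 4),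
--     ("festival", 5), ("celebration", 5), ("holiday", 5), ("diwali", 5), ("christmas", 5),
-- ]
-- LABELS = ["Vacation", "Medical", "Personal Emergency", "Family Matter",
--           "Wedding", "Festival/Celebration", "Personal"]
--
-- def _extract_reason_from_message(message):
--     m = message.lower()
--     best = 6
--     for kw, p in KEYWORD_PRIORITY:
--         if kw in m:
--             best = min(best, p)
--     return LABELS[best]
-- ===== Notes on version B (the rewrite author's own statement) =====
-- stated objective: alternative
-- what changed: Instead of an ordered if/elif chain returning at the first matching keyword group, B exhaustively scans a flat keyword->priority table, maintains the numeric minimum priority of every matched keyword, and indexes into a label array (no short-circuit control flow).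
import Mathlib
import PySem

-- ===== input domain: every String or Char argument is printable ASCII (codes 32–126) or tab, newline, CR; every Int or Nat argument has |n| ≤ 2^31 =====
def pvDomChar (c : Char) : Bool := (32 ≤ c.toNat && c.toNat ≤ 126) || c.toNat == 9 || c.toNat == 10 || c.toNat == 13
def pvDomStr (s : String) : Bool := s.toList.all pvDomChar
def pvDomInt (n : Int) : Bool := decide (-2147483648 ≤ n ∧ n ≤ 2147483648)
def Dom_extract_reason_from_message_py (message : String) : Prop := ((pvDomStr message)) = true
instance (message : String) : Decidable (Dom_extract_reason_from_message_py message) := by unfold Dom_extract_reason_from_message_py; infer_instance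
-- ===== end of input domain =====

-- B replaces A's early-return if/elif keyword chain by an exhaustive scan of a flat keyword->priority table, keeping the minimum matched priority and indexing a label array (objective: alternative).


-- ===== PORT A =====
-- Literal port of A: lowercase once, then the if/elif chain of substring tests with early return.
def extract_reason_from_message_py (message : String) : String :=
  let message_lower := PySem.Str.lower message
  if PySem.Str.isIn "vacation" message_lower then "Vacation"
  else if ["sick", "medical", "ill", "hospital", "doctor", "fever", "health", "not well"].any
      (fun word => PySem.Str.isIn word message_lower) then "Medical"
  else if ["emergency", "urgent", "personal"].any
      (fun word => PySem.Str.isIn word message_lower) then "Personal Emergency"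
  else if ["family", "relative", "parent"].any
      (fun word => PySem.Str.isIn word message_lower) then "Family Matter"
  else if ["wedding", "marriage"].any
      (fun word => PySem.Str.isIn word message_lower) then "Wedding"
  else if ["festival", "celebration", "holiday", "diwali", "christmas"].any
      (fun word => PySem.Str.isIn word message_lower) then "Festival/Celebration"
  else "Personal"

-- ===== PORT B =====
-- B: flat (keyword, priority) table; fold keeping the minimum priority among matched keywords; index into the label array.
def pvKeywordPriority : List (String × Nat) :=
  [("vacation", 0),
   ("sick", 1), ("medical", 1), ("ill", 1), ("hospital", 1),
   ("doctor", 1), ("fever", 1), ("health", 1), ("not well", 1),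
   ("emergency", 2), ("urgent", 2), ("personal", 2),
   ("family", 3), ("relative", 3), ("parent", 3),
   ("wedding", 4), ("marriage", 4),
   ("festival", 5), ("celebration", 5), ("holiday", 5), ("diwali", 5), ("christmas", 5)]

def pvLabels : List String :=
  ["Vacation", "Medical", "Personal Emergency", "Family Matter",
   "Wedding", "Festival/Celebration", "Personal"]

def extract_reason_from_message_py_alt (message : String) : String :=
  let m := PySem.Str.lower message
  let best := pvKeywordPriority.foldl
    (fun best kp => if PySem.Str.isIn kp.1 m then min best kp.2 else best) 6
  pvLabels.getD best ""

-- ===== PRECONDITION & SPEC =====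
def Spec_extract_reason_from_message_py (message : String) (out : String) : Prop := out = extract_reason_from_message_py_alt message
instance (message : String) (out : String) : Decidable (Spec_extract_reason_from_message_py message out) := by unfold Spec_extract_reason_from_message_py; infer_instance

-- ===== CLAIM =====
def Claim_equal_extract_reason_from_message_py : Prop := ∀ (message : String), Dom_extract_reason_from_message_py message → Spec_extract_reason_from_message_py message (extract_reason_from_message_py message)

-- ===== LEMMAS AND PROOFS =====

-- folding min over a same-priority keyword group equals one min guarded by "any keyword matched"
theorem pv_fold_group (m : String) (kws : List String) (p acc : Nat) :
    List.foldl (fun best kp => if PySem.Str.isIn kp.1 m then min best kp.2 else best) acc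
      (kws.map (fun w => (w, p)))
      = if kws.any (fun w => PySem.Str.isIn w m) then min acc p else acc := by
  induction kws generalizing acc with
  | nil => simp
  | cons k rest ih =>
      simp only [List.map_cons, List.foldl_cons, List.any_cons]
      rw [ih]
      by_cases hk : PySem.Str.isIn k m = true <;>
      by_cases hr : (rest.any fun w => PySem.Str.isIn w m) = true <;>
        simp only [hk, hr, Bool.true_or, Bool.false_or, Bool.or_false, if_true, if_false,
          Bool.false_eq_true] at * <;> omega

theorem pvKeywordPriority_eq_groups :
    pvKeywordPriority =
      (["vacation"].map (fun w => (w, 0)))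
      ++ (["sick", "medical", "ill", "hospital", "doctor", "fever", "health", "not well"].map (fun w => (w, 1)))
      ++ (["emergency", "urgent", "personal"].map (fun w => (w, 2)))
      ++ (["family", "relative", "parent"].map (fun w => (w, 3)))
      ++ (["wedding", "marriage"].map (fun w => (w, 4)))
      ++ (["festival", "celebration", "holiday", "diwali", "christmas"].map (fun w => (w, 5))) := rfl

-- ===== VERDICT =====
theorem extract_reason_from_message_py_spec : Claim_equal_extract_reason_from_message_py := by
  intro message _
  unfold Spec_extract_reason_from_message_py
  unfold extract_reason_from_message_py extract_reason_from_message_py_alt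
  rw [pvKeywordPriority_eq_groups]
  simp only [List.foldl_append, pv_fold_group, List.any_cons, List.any_nil, Bool.or_false]
  split_ifs <;> rfl
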